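-- pv_equiv track=rewrite | github.com/amshrestha2020/CodeSignal | CodeSignal/Company_Challenges/blockStorageRewrites.py | solution
-- ===== SOURCE A (Python) =====
-- def solution(blockCount, writes, threshold):
--     # Initialize the number of writes for each block
--     writes_count = [0] * blockCount
--
--     # Update the number of writes for each block
--     for start, end in writes:
--         writes_count[start] += 1
--         if end + 1 < blockCount:
--             writes_count[end + 1] -= 1
--
--     # Calculate the prefix sum of writes_count
--     for i in range(1, blockCount):
--         writes_count[i] += writes_count[i - 1]
--
--     # Find the disjoint segments of blocks that have reached the rewrite threshold
--     segments = []
--     segment_start = -1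
--     for i in range(blockCount):
--         if writes_count[i] >= threshold and segment_start == -1:
--             segment_start = i
--         elif writes_count[i] < threshold and segment_start != -1:
--             segments.append([segment_start, i - 1])
--             segment_start = -1
--     if segment_start != -1:
--         segments.append([segment_start, blockCount - 1])
--
--     return segments
-- ===== SOURCE B (Python) =====
-- def solution(blockCount, writes, threshold):
--     # Build the same difference array, but never materialize prefix sums:
--     # a running accumulator collects the hot block indices in one pass,
--     # and consecutive hot indices are then grouped into segments.
--     deltas = [0] * blockCount
--     for start, end in writes:
--         deltas[start] += 1
--         if end + 1 < blockCount:
--             deltas[end + 1] -= 1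
--     hot = []
--     running = 0
--     for i in range(blockCount):
--         running += deltas[i]
--         if running >= threshold:
--             hot.append(i)
--     segments = []
--     for i in hot:
--         if segments and segments[-1][1] == i - 1:
--             segments[-1][1] = i
--         else:
--             segments.append([i, i])
--     return segments
-- ===== Notes on version B (the rewrite author's own statement) =====
-- stated objective: alternative
-- what changed: B keeps the difference-array build but replaces the in-place prefix-sum pass with a running-sum accumulator that collects the hot block indices in one pass, and replaces A's online segment state machine with grouping of consecutive hot indices.
import Mathlib
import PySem

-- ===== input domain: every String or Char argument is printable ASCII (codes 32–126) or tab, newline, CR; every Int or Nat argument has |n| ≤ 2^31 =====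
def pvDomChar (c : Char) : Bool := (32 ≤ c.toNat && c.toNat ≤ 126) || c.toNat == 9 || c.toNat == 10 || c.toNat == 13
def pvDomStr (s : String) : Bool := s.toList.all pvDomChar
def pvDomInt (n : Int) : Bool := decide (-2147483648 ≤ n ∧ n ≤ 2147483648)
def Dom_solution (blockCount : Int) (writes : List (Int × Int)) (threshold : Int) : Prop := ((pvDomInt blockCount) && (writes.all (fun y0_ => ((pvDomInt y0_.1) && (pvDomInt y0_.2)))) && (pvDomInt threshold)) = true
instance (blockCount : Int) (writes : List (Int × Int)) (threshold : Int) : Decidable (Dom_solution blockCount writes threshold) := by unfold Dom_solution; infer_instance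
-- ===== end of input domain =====

-- B keeps the difference-array build but drops the in-place prefix-sum pass (a running
-- accumulator collects the hot indices) and finds segments by grouping consecutive hot
-- indices instead of A's online state machine (objective: alternative decomposition).

-- ===== PORT A =====
-- writes_count[start] += 1; if end+1 < blockCount: writes_count[end+1] -= 1
-- (pySetD/pyGetD are exact here: under Pre_ every touched index is in range, with
--  Python's negative-index wraparound)
def stepWrite (blockCount : Int) (wc : List Int) (p : Int × Int) : List Int :=
  let wc1 := PySem.List.pySetD wc p.1 (PySem.List.pyGetD wc p.1 0 + 1)
  if p.2 + 1 < blockCount then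
    PySem.List.pySetD wc1 (p.2 + 1) (PySem.List.pyGetD wc1 (p.2 + 1) 0 - 1)
  else wc1

-- writes_count[i] += writes_count[i-1]
def stepPrefix (wc : List Int) (i : Int) : List Int :=
  PySem.List.pySetD wc i (PySem.List.pyGetD wc i 0 + PySem.List.pyGetD wc (i - 1) 0)

-- the segment-finding loop body of A (state: (segments, segment_start))
def stepScan (wc2 : List Int) (threshold : Int) (acc : List (List Int) × Int) (i : Int) :
    List (List Int) × Int :=
  if PySem.List.pyGetD wc2 i 0 ≥ threshold ∧ acc.2 = -1 then (acc.1, i)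
  else if PySem.List.pyGetD wc2 i 0 < threshold ∧ acc.2 ≠ -1 then (acc.1 ++ [[acc.2, i - 1]], -1)
  else acc

def solution (blockCount : Int) (writes : List (Int × Int)) (threshold : Int) : List (List Int) :=
  let wc0 : List Int := List.replicate blockCount.toNat 0
  let wc1 := writes.foldl (stepWrite blockCount) wc0
  let wc2 := (PySem.List.pyRange 1 blockCount 1).foldl stepPrefix wc1
  let st := (PySem.List.pyRange 0 blockCount 1).foldl (stepScan wc2 threshold) ([], -1)
  if st.2 ≠ -1 then st.1 ++ [[st.2, blockCount - 1]] else st.1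

-- ===== PORT B =====
-- deltas[start] += 1; if end+1 < blockCount: deltas[end+1] -= 1  (B's difference-array build)
def stepWriteB (blockCount : Int) (wc : List Int) (p : Int × Int) : List Int :=
  let wc1 := PySem.List.pySetD wc p.1 (PySem.List.pyGetD wc p.1 0 + 1)
  if p.2 + 1 < blockCount then
    PySem.List.pySetD wc1 (p.2 + 1) (PySem.List.pyGetD wc1 (p.2 + 1) 0 - 1)
  else wc1

-- running += deltas[i]; if running >= threshold: hot.append(i)   (state: (running, hot))
def stepHot (deltas : List Int) (threshold : Int) (acc : Int × List Int) (i : Int) :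
    Int × List Int :=
  let r := acc.1 + PySem.List.pyGetD deltas i 0
  (r, if r ≥ threshold then acc.2 ++ [i] else acc.2)

-- if segments and segments[-1][1] == i - 1: segments[-1][1] = i else: segments.append([i, i])
def stepGroup (segs : List (List Int)) (i : Int) : List (List Int) :=
  if segs ≠ [] ∧ PySem.List.pyGetD (PySem.List.pyGetD segs (-1) []) 1 0 = i - 1 then
    segs.dropLast ++ [[PySem.List.pyGetD (PySem.List.pyGetD segs (-1) []) 0 0, i]]
  else segs ++ [[i, i]]

def solution_alt (blockCount : Int) (writes : List (Int × Int)) (threshold : Int) :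
    List (List Int) :=
  let deltas := writes.foldl (stepWriteB blockCount) (List.replicate blockCount.toNat 0)
  let rh := (PySem.List.pyRange 0 blockCount 1).foldl (stepHot deltas threshold) (0, [])
  rh.2.foldl stepGroup []

-- ===== PRECONDITION & SPEC =====
-- Pre_ is exactly A's domain: it excludes only inputs on which A raises IndexError
-- (a write start outside [-blockCount, blockCount), or a decremented cell end+1 below
-- -blockCount); B raises on the same inputs.
def Pre_solution (blockCount : Int) (writes : List (Int × Int)) (threshold : Int) : Prop :=
  ∀ p ∈ writes, (-blockCount ≤ p.1 ∧ p.1 < blockCount) ∧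
    (p.2 + 1 < blockCount → -blockCount ≤ p.2 + 1)
instance (blockCount : Int) (writes : List (Int × Int)) (threshold : Int) : Decidable (Pre_solution blockCount writes threshold) := by unfold Pre_solution; infer_instance

def pvWitness_solution : Int × (List (Int × Int)) × Int := (4, [(0, 1), (1, 5)], 2)

def Spec_solution (blockCount : Int) (writes : List (Int × Int)) (threshold : Int) (out : List (List Int)) : Prop := out = solution_alt blockCount writes threshold
instance (blockCount : Int) (writes : List (Int × Int)) (threshold : Int) (out : List (List Int)) : Decidable (Spec_solution blockCount writes threshold out) := by unfold Spec_solution; infer_instance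

-- ===== CLAIM (what is proved, stated in full; the proofs are below) =====
def Claim_equal_solution : Prop := ∀ (blockCount : Int) (writes : List (Int × Int)) (threshold : Int), Dom_solution blockCount writes threshold → Pre_solution blockCount writes threshold → Spec_solution blockCount writes threshold (solution blockCount writes threshold)

-- ===== LEMMAS AND PROOFS =====

theorem getD_set_self (l : List Int) (i : Nat) (v : Int) (h : i < l.length) :
    (l.set i v).getD i 0 = v := by
  simp [List.getD_eq_getElem?_getD, h]

theorem getD_set_ne (l : List Int) (i j : Nat) (v : Int) (h : i ≠ j) :
    (l.set i v).getD j 0 = l.getD j 0 := by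
  simp [List.getD_eq_getElem?_getD, h]

theorem foldl_length_inv {α : Type} (f : List Int → α → List Int)
    (h : ∀ wc a, (f wc a).length = wc.length) (l : List α) (wc : List Int) :
    (l.foldl f wc).length = wc.length := by
  induction l generalizing wc with
  | nil => rfl
  | cons x xs ih => simp [List.foldl_cons, ih, h]

theorem length_stepWrite (bc : Int) (wc : List Int) (p : Int × Int) :
    (stepWrite bc wc p).length = wc.length := by
  unfold stepWrite
  split <;> simp [PySem.List.length_pySetD]

theorem length_stepPrefix (wc : List Int) (i : Int) :
    (stepPrefix wc i).length = wc.length := by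
  simp [stepPrefix, PySem.List.length_pySetD]

-- after the prefix-sum pass, cell j holds the sum of the first j+1 difference cells
theorem foldl_stepPrefix_getD (wc : List Int) (m : Nat) :
    m ≤ wc.length → ∀ j, j < wc.length →
    ((PySem.List.pyRange 1 (m : Int) 1).foldl stepPrefix wc).getD j 0
      = if j < m then (wc.take (j + 1)).sum else wc.getD j 0 := by
  induction m with
  | zero =>
    intro _ j hj
    rw [PySem.List.pyRange_one_eq_nil (by norm_num)]
    simp
  | succ m ih =>
    intro hm j hj
    match m, ih with
    | 0, _ =>
      rw [show ((0 + 1 : Nat) : Int) = 1 by norm_num, PySem.List.pyRange_one_eq_nil le_rfl,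
          List.foldl_nil]
      by_cases h0 : j = 0
      · subst h0
        rw [if_pos (by omega), List.sum_take_succ wc 0 (by omega), List.getD_eq_getElem wc 0 hj]
        simp
      · rw [if_neg (by omega)]
    | m + 1, ih =>
      have hcast : (((m + 1) + 1 : Nat) : Int) = ((m + 1 : Nat) : Int) + 1 := by push_cast; ring
      rw [hcast, PySem.List.pyRange_one_succ_right (by push_cast; omega), List.foldl_append,
          List.foldl_cons, List.foldl_nil]
      set W := (PySem.List.pyRange 1 ((m + 1 : Nat) : Int) 1).foldl stepPrefix wc with hW
      have hWlen : W.length = wc.length := foldl_length_inv _ length_stepPrefix _ _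
      have hm1 : (m + 1 : Nat) ≤ wc.length := by omega
      unfold stepPrefix
      rw [PySem.List.pySetD_of_nonneg _ _ (by positivity),
          PySem.List.pyGetD_of_nonneg _ _ (by positivity),
          PySem.List.pyGetD_of_nonneg _ _ (by push_cast; omega),
          show (((m + 1 : Nat) : Int)).toNat = m + 1 by omega,
          show (((m + 1 : Nat) : Int) - 1).toNat = m by omega,
          ih (by omega) (m + 1) (by omega), ih (by omega) m (by omega),
          if_neg (by omega), if_pos (by omega)]
      by_cases hjm : j = m + 1
      · subst hjm
        rw [getD_set_self _ _ _ (by rw [hWlen]; omega), if_pos (by omega),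
            List.sum_take_succ wc (m + 1) (by omega), List.getD_eq_getElem wc 0
              (show m + 1 < wc.length by omega)]
        omega
      · rw [getD_set_ne _ _ _ _ (by omega), ih (by omega) j hj]
        split_ifs <;> first | rfl | omega

-- B's running-sum pass returns the full sum and the hot indices (a filter of the range)
theorem foldl_stepHot (deltas : List Int) (th : Int) (m : Nat) (hm : m ≤ deltas.length) :
    (PySem.List.pyRange 0 (m : Int) 1).foldl (stepHot deltas th) (0, [])
      = ((deltas.take m).sum,
         (PySem.List.pyRange 0 (m : Int) 1).filter
           (fun j => decide ((deltas.take (j.toNat + 1)).sum ≥ th))) := by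
  induction m with
  | zero =>
    rw [PySem.List.pyRange_one_eq_nil (by norm_num)]
    simp
  | succ m ih =>
    have hcast : ((m + 1 : Nat) : Int) = ((m : Nat) : Int) + 1 := by push_cast; ring
    rw [hcast, PySem.List.pyRange_one_succ_right (by positivity), List.foldl_append,
        List.foldl_cons, List.foldl_nil, ih (by omega), List.filter_append]
    unfold stepHot
    rw [PySem.List.pyGetD_of_nonneg _ _ (by positivity),
        show (((m : Nat) : Int)).toNat = m by omega,
        List.getD_eq_getElem _ 0 (show m < deltas.length by omega),
        ← List.sum_take_succ deltas m (by omega)]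
    simp only [List.filter_cons, List.filter_nil, Int.toNat_natCast]
    split_ifs with h1 h2 h2 <;> simp_all <;> omega

-- grouping the hot indices of range(m) reproduces A's scan state machine:
-- if the machine is outside a segment the grouped output equals its segments (and no
-- grouped segment ends at m-1); inside a segment the open segment [start, m-1] is the
-- grouped output's last element
theorem group_eq_scan (wc2 : List Int) (th : Int) (m : Nat) :
    (((PySem.List.pyRange 0 (m : Int) 1).foldl (stepScan wc2 th) ([], -1)).2 = -1 →
      ((PySem.List.pyRange 0 (m : Int) 1).filter
          (fun j => decide (PySem.List.pyGetD wc2 j 0 ≥ th))).foldl stepGroup []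
        = ((PySem.List.pyRange 0 (m : Int) 1).foldl (stepScan wc2 th) ([], -1)).1 ∧
      (((PySem.List.pyRange 0 (m : Int) 1).filter
          (fun j => decide (PySem.List.pyGetD wc2 j 0 ≥ th))).foldl stepGroup [] = [] ∨
        PySem.List.pyGetD (PySem.List.pyGetD
          (((PySem.List.pyRange 0 (m : Int) 1).filter
            (fun j => decide (PySem.List.pyGetD wc2 j 0 ≥ th))).foldl stepGroup [])
          (-1) []) 1 0 ≤ (m : Int) - 2)) ∧
    (((PySem.List.pyRange 0 (m : Int) 1).foldl (stepScan wc2 th) ([], -1)).2 ≠ -1 →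
      ((PySem.List.pyRange 0 (m : Int) 1).filter
          (fun j => decide (PySem.List.pyGetD wc2 j 0 ≥ th))).foldl stepGroup []
        = ((PySem.List.pyRange 0 (m : Int) 1).foldl (stepScan wc2 th) ([], -1)).1
          ++ [[((PySem.List.pyRange 0 (m : Int) 1).foldl (stepScan wc2 th) ([], -1)).2,
               (m : Int) - 1]] ∧
      0 ≤ ((PySem.List.pyRange 0 (m : Int) 1).foldl (stepScan wc2 th) ([], -1)).2 ∧
      ((PySem.List.pyRange 0 (m : Int) 1).foldl (stepScan wc2 th) ([], -1)).2
        ≤ (m : Int) - 1) := by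
  induction m with
  | zero =>
    rw [PySem.List.pyRange_one_eq_nil (by norm_num)]
    simp
  | succ m ih =>
    have hcast : ((m + 1 : Nat) : Int) = ((m : Nat) : Int) + 1 := by push_cast; ring
    rw [hcast, PySem.List.pyRange_one_succ_right (by positivity), List.foldl_append,
        List.foldl_cons, List.foldl_nil, List.filter_append, List.foldl_append]
    set sm := (PySem.List.pyRange 0 (m : Int) 1).foldl (stepScan wc2 th) ([], -1) with hsm
    set gr := ((PySem.List.pyRange 0 (m : Int) 1).filter
        (fun j => decide (PySem.List.pyGetD wc2 j 0 ≥ th))).foldl stepGroup [] with hgr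
    obtain ⟨ihout, ihin⟩ := ih
    by_cases hc : PySem.List.pyGetD wc2 ((m : Nat) : Int) 0 ≥ th
    · -- position m is hot: it joins (or opens) a segment in both programs
      rw [List.filter_cons, if_pos (by simpa using hc), List.filter_nil, List.foldl_cons,
          List.foldl_nil]
      unfold stepScan stepGroup
      by_cases hst : sm.2 = -1
      · obtain ⟨hg, hlast⟩ := ihout hst
        rw [if_pos ⟨hc, hst⟩]
        rcases hlast with hnil | hle
        · have hsm1 : sm.1 = [] := hg.symm.trans hnil
          constructor
          · intro h; exact absurd h (by simp)
          · intro _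
            rw [if_neg (by simp [hnil]), hnil, hsm1]
            refine ⟨by simp, by simp, by simp⟩
        · constructor
          · intro h; exact absurd h (by simp)
          · intro _
            rw [if_neg (by rintro ⟨-, he⟩; omega), hg]
            refine ⟨by simp, by simp, by simp⟩
      · obtain ⟨hg, hpos, hlt⟩ := ihin hst
        rw [if_neg (by tauto), if_neg (by rintro ⟨h1, -⟩; omega)]
        constructor
        · intro h; exact absurd h hst
        · intro _
          rw [if_pos ⟨by simp [hg], by
                rw [hg, PySem.List.pyGetD_neg_one_append_singleton]
                simp [PySem.List.pyGetD, PySem.List.pyGet?, PySem.List.pyIdx?]⟩,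
              hg, PySem.List.pyGetD_neg_one_append_singleton, List.dropLast_concat]
          refine ⟨by simp [PySem.List.pyGetD, PySem.List.pyGet?, PySem.List.pyIdx?], hpos,
            by omega⟩
    · -- position m is not hot: A closes any open segment, B skips the index
      rw [List.filter_cons, if_neg (by simpa using hc), List.filter_nil, List.foldl_nil]
      unfold stepScan
      by_cases hst : sm.2 = -1
      · obtain ⟨hg, hlast⟩ := ihout hst
        rw [if_neg (by tauto), if_neg (by tauto)]
        constructor
        · intro _
          refine ⟨hg, ?_⟩
          rcases hlast with hnil | hle
          · exact Or.inl hnil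
          · exact Or.inr (by omega)
        · intro h; exact absurd hst h
      · obtain ⟨hg, hpos, hlt⟩ := ihin hst
        rw [if_neg (by tauto), if_pos ⟨by omega, hst⟩]
        constructor
        · intro _
          refine ⟨hg, Or.inr ?_⟩
          rw [hg, PySem.List.pyGetD_neg_one_append_singleton]
          simp only [PySem.List.pyGetD, PySem.List.pyGet?, PySem.List.pyIdx?]
          norm_num
          omega
        · intro h; exact absurd rfl h

-- ===== VERDICT (by name: the statement is the Claim_ definition above) =====
theorem solution_spec : Claim_equal_solution := by
  intro bc ws th _ _
  show solution bc ws th = solution_alt bc ws th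
  unfold solution solution_alt
  dsimp only
  have hBW : stepWriteB = stepWrite := rfl
  rw [hBW]
  set wc1 := ws.foldl (stepWrite bc) (List.replicate bc.toNat 0) with hwc1
  have hlen1 : wc1.length = bc.toNat := by
    rw [hwc1, foldl_length_inv _ (length_stepWrite bc), List.length_replicate]
  by_cases hbc : 0 < bc
  · have hbcn : ((bc.toNat : Nat) : Int) = bc := Int.toNat_of_nonneg (by omega)
    rw [show PySem.List.pyRange 0 bc 1 = PySem.List.pyRange 0 ((bc.toNat : Nat) : Int) 1 by
          rw [hbcn],
        foldl_stepHot wc1 th bc.toNat (by omega)]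
    dsimp only
    have hfilter : (PySem.List.pyRange 0 ((bc.toNat : Nat) : Int) 1).filter
          (fun j => decide ((wc1.take (j.toNat + 1)).sum ≥ th))
        = (PySem.List.pyRange 0 ((bc.toNat : Nat) : Int) 1).filter
          (fun j => decide (PySem.List.pyGetD
            ((PySem.List.pyRange 1 bc 1).foldl stepPrefix wc1) j 0 ≥ th)) := by
      apply List.filter_congr
      intro j hj
      rw [PySem.List.mem_pyRange_one] at hj
      rw [show PySem.List.pyRange 1 bc 1 = PySem.List.pyRange 1 ((bc.toNat : Nat) : Int) 1 by
            rw [hbcn]]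
      rw [PySem.List.pyGetD_of_nonneg _ _ hj.1,
          foldl_stepPrefix_getD wc1 bc.toNat (by omega) j.toNat (by omega),
          if_pos (by omega)]
    rw [hfilter]
    have h := group_eq_scan ((PySem.List.pyRange 1 bc 1).foldl stepPrefix wc1) th bc.toNat
    set sm := (PySem.List.pyRange 0 ((bc.toNat : Nat) : Int) 1).foldl
        (stepScan ((PySem.List.pyRange 1 bc 1).foldl stepPrefix wc1) th) ([], -1) with hsm
    by_cases hst : sm.2 = -1
    · rw [if_neg (by simpa using hst)]
      exact ((h.1) hst).1.symm
    · rw [if_pos (by simpa using hst)]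
      have := (h.2) hst
      rw [this.1, hbcn]
  · rw [PySem.List.pyRange_one_eq_nil (by omega), PySem.List.pyRange_one_eq_nil (by omega)]
    simp
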